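-- pv_equiv track=rewrite | github.com/arnabs542/data_structure_and_algorithm_practice | CodingBat_Recursion/recursion_1.py | count8
-- ===== SOURCE A (Python) =====
-- def count8(num):
--     if num==0:
--         return 0
--     if num%10==8 and (num//10)%10==8:
--         return 2+count8(num//10)
--     if num%10==8:
--         return 1+count8(num//10)
--     return 0+count8(num//10)
-- ===== SOURCE B (Python) =====
-- def count8(num):
--     digits = []
--     n = num
--     while n != 0:
--         digits.append(n % 10)
--         n //= 10
--     return sum((2 if h == 8 else 1) for d, h in zip(digits, digits[1:] + [0]) if d == 8)
-- ===== Notes on version B (the rewrite author's own statement) =====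
-- stated objective: alternative
-- what changed: B first extracts the digit list (least-significant first) and then counts by zipping each digit with its more-significant neighbour, instead of A's recursion that inspects %10 and (//10)%10 at each call.
import Mathlib
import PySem

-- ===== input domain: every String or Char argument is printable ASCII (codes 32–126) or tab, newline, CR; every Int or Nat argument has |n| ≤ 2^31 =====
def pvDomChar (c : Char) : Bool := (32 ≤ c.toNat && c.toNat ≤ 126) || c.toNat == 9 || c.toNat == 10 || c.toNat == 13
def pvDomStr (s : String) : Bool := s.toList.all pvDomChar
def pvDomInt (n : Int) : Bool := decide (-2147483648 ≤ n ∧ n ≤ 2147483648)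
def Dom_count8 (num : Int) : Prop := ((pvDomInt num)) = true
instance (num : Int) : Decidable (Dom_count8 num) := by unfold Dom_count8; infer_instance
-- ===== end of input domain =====

-- B extracts the digit list first and then counts by zipping each digit with its more-significant
-- neighbour, instead of A's recursion over %10 / //10 checks (alternative decomposition, same cost).

-- ===== PORT A =====
-- fuel makes the recursion total; num.natAbs + 1 suffices for every num ≥ 0 (the inputs Pre_ admits)
def count8Go : Nat → Int → Int
  | 0, _ => 0
  | f + 1, num =>
    if num = 0 then 0
    else if PySem.Int.mod num 10 = 8 ∧ PySem.Int.mod (PySem.Int.floordiv num 10) 10 = 8 then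
      2 + count8Go f (PySem.Int.floordiv num 10)
    else if PySem.Int.mod num 10 = 8 then
      1 + count8Go f (PySem.Int.floordiv num 10)
    else
      0 + count8Go f (PySem.Int.floordiv num 10)

def count8 (num : Int) : Int := count8Go (num.natAbs + 1) num

-- ===== PORT B =====
-- the digit-extraction while-loop of Source B (least-significant digit first), same fuel bound
def digitsGo : Nat → Int → List Int
  | 0, _ => []
  | f + 1, n =>
    if n = 0 then []
    else PySem.Int.mod n 10 :: digitsGo f (PySem.Int.floordiv n 10)

-- Source B's zip/sum comprehension: pair each digit with the next (more significant) one, default 0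
def count8_alt (num : Int) : Int :=
  let digits := digitsGo (num.natAbs + 1) num
  (((digits.zip (digits.drop 1 ++ [0])).filter (fun p => p.1 = 8)).map
    (fun p => if p.2 = 8 then (2 : Int) else 1)).sum

-- ===== PRECONDITION & SPEC =====
-- Pre_ excludes num < 0: there Python A recurses forever (RecursionError) and B's loop never terminates.
def Pre_count8 (num : Int) : Prop := 0 ≤ num
instance (num : Int) : Decidable (Pre_count8 num) := by unfold Pre_count8; infer_instance
def pvWitness_count8 : Int := 8818

def Spec_count8 (num : Int) (out : Int) : Prop := out = count8_alt num
instance (num : Int) (out : Int) : Decidable (Spec_count8 num out) := by unfold Spec_count8; infer_instance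

-- ===== CLAIM =====
def Claim_equal_count8 : Prop := ∀ (num : Int), Dom_count8 num → Pre_count8 num → Spec_count8 num (count8 num)

-- ===== LEMMAS AND PROOFS =====

-- B's zip/filter/map/sum count, as a function of the digit list
def pairCount (ds : List Int) : Int :=
  (((ds.zip (ds.drop 1 ++ [0])).filter (fun p => p.1 = 8)).map
    (fun p => if p.2 = 8 then (2 : Int) else 1)).sum

theorem pairCount_cons (d : Int) (ds : List Int) :
    pairCount (d :: ds) =
      (if d = 8 then (if ds.headD 0 = 8 then (2 : Int) else 1) else 0) + pairCount ds := by
  cases ds with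
  | nil => by_cases h : d = 8 <;> simp [pairCount, h]
  | cons e es => by_cases h : d = 8 <;> simp [pairCount, h]

theorem floordiv_lt (n : Int) (h0 : 0 ≤ n) (hn : n ≠ 0) :
    (PySem.Int.floordiv n 10).natAbs < n.natAbs ∧ 0 ≤ PySem.Int.floordiv n 10 := by
  rw [PySem.Int.floordiv_eq_ediv_of_pos (by omega)]
  omega

theorem count8Go_eq_pairCount (f : Nat) : ∀ (n : Int), 0 ≤ n → n.natAbs < f →
    count8Go f n = pairCount (digitsGo f n) := by
  induction f with
  | zero => intro n _ h; omega
  | succ f ih =>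
    intro n h0 hf
    by_cases hn : n = 0
    · simp [count8Go, digitsGo, hn, pairCount]
    · have hd := floordiv_lt n h0 hn
      have hrec : (PySem.Int.floordiv n 10).natAbs < f := by omega
      simp only [count8Go, digitsGo]
      rw [if_neg hn, if_neg hn, pairCount_cons, ih _ hd.2 hrec]
      by_cases hq : PySem.Int.floordiv n 10 = 0
      · -- quotient 0: the next digit defaults to 0 and (n//10)%10 is 0 as well
        have hh : (digitsGo f (PySem.Int.floordiv n 10)).headD 0 = 0 := by
          cases f with
          | zero => rfl
          | succ f => simp only [digitsGo, if_pos hq]; rfl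
        have hm : PySem.Int.mod (PySem.Int.floordiv n 10) 10 = 0 := by
          rw [hq]; rfl
        rw [hh, hm]
        by_cases hm8 : PySem.Int.mod n 10 = 8 <;> simp at hm8 <;> simp [hm8]
      · -- quotient nonzero: the head of its digit list is exactly (n//10)%10
        have hh : (digitsGo f (PySem.Int.floordiv n 10)).headD 0
            = PySem.Int.mod (PySem.Int.floordiv n 10) 10 := by
          cases f with
          | zero => omega
          | succ f => simp only [digitsGo, if_neg hq]; rfl
        rw [hh]
        by_cases hm8 : PySem.Int.mod n 10 = 8 <;>
          by_cases hq8 : PySem.Int.mod (PySem.Int.floordiv n 10) 10 = 8 <;>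
            simp at hm8 hq8 <;> simp [hm8, hq8]

-- ===== VERDICT =====
theorem count8_spec : Claim_equal_count8 := by
  intro num _ hpre
  unfold Spec_count8 count8 count8_alt
  rw [count8Go_eq_pairCount (num.natAbs + 1) num hpre (by omega)]
  rfl
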